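-- pv_equiv track=rewrite | github.com/doppelyouz/pythonLabs | main5.py | get_elements_with_no_more_than_two_occurrences
-- ===== SOURCE A (Python) =====
-- def get_elements_with_no_more_than_two_occurrences(input_list):
--     result = []
--     count_dict = {}
--
--     for num in input_list:
--         if num in count_dict:
--             count_dict[num] += 1
--         else:
--             count_dict[num] = 1
--
--     for num, count in count_dict.items():
--         if count <= 2:
--             result.append(num)
--
--     return result
-- ===== SOURCE B (Python) =====
-- def get_elements_with_no_more_than_two_occurrences(input_list):
--     # Sort a copy and find the "overfull" values (count >= 3) by run-length
--     # scanning of the sorted list; then one pass over the original keeping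
--     # first occurrences that are not overfull.
--     s = sorted(input_list)
--     overfull = set()
--     i, n = 0, len(s)
--     while i < n:
--         j = i
--         while j < n and s[j] == s[i]:
--             j += 1
--         if j - i > 2:
--             overfull.add(s[i])
--         i = j
--     result = []
--     seen = set()
--     for x in input_list:
--         if x not in seen:
--             seen.add(x)
--             if x not in overfull:
--                 result.append(x)
--     return result
-- ===== Notes on version B (the rewrite author's own statement) =====
-- stated objective: alternative
-- what changed: Replaces the hash-count table with a sort-based strategy: sort a copy, detect overfull values (count >= 3) by run-length scanning of the sorted list, then one pass over the original keeps first occurrences that are not overfull.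
import Mathlib
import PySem

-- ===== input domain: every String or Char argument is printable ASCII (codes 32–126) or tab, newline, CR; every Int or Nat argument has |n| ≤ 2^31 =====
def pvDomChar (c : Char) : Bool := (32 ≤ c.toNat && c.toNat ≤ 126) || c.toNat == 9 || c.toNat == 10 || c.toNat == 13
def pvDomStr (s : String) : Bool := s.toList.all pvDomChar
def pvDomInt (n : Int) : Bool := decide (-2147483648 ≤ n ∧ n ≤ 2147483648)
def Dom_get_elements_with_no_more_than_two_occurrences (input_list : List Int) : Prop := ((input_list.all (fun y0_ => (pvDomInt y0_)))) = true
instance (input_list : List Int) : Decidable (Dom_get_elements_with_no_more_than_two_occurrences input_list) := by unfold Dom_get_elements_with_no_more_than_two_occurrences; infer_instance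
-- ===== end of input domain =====

-- B (objective: alternative): sort-based — sort a copy, find overfull values (count ≥ 3) by
-- run-length scanning of the sorted list, then one pass over the original keeping first
-- occurrences that are not overfull; instead of A's count-dict plus items-filter.

-- ===== PORT A =====
-- Port of A: build the count dict with a fold, then filter its items.
def get_elements_with_no_more_than_two_occurrences (input_list : List Int) : List Int :=
  let count_dict : PySem.Dict Int Int :=
    input_list.foldl (fun d num =>
      if d.contains num then d.insert num (d.getD num 0 + 1)
      else d.insert num 1) PySem.Dict.empty
  count_dict.items.foldl (fun result p =>
    if p.2 ≤ 2 then result ++ [p.1] else result) []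

-- ===== PORT B =====
-- Run-scanning loop of Source B: peel the run of elements equal to the head of the (sorted)
-- remainder; if it is longer than 2, add its value to the overfull set.
def pvOverfull (acc : PySem.Set Int) : List Int → PySem.Set Int
  | [] => acc
  | x :: t =>
    pvOverfull
      (if 2 < (t.takeWhile (fun y => y == x)).length + 1 then PySem.Set.add acc x else acc)
      (t.dropWhile (fun y => y == x))
termination_by s => s.length
decreasing_by
  simp only [List.length_cons]
  exact Nat.lt_succ_of_le (List.length_dropWhile_le _ _)

def get_elements_with_no_more_than_two_occurrences_alt (input_list : List Int) : List Int :=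
  let s := PySem.List.sorted input_list (fun x => x) false
  let overfull := pvOverfull PySem.Set.empty s
  (input_list.foldl (fun (p : PySem.Set Int × List Int) x =>
      if PySem.Set.contains p.1 x then p
      else (PySem.Set.add p.1 x,
            if PySem.Set.contains overfull x then p.2 else p.2 ++ [x]))
    (PySem.Set.empty, [])).2

-- ===== PRECONDITION & SPEC =====
def Spec_get_elements_with_no_more_than_two_occurrences (input_list : List Int) (out : List Int) : Prop := out = get_elements_with_no_more_than_two_occurrences_alt input_list
instance (input_list : List Int) (out : List Int) : Decidable (Spec_get_elements_with_no_more_than_two_occurrences input_list out) := by unfold Spec_get_elements_with_no_more_than_two_occurrences; infer_instance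

-- ===== CLAIM (what is proved, stated in full; the proofs are below) =====
def Claim_equal_get_elements_with_no_more_than_two_occurrences : Prop := ∀ (input_list : List Int), Dom_get_elements_with_no_more_than_two_occurrences input_list → Spec_get_elements_with_no_more_than_two_occurrences input_list (get_elements_with_no_more_than_two_occurrences input_list)

-- ===== LEMMAS AND PROOFS =====

-- A's counting step equals the canonical counter step once the contains-test is resolved.
theorem pvStepEq : (fun (d : PySem.Dict Int Int) (num : Int) =>
      if d.contains num then d.insert num (d.getD num 0 + 1)
      else d.insert num 1)
    = (fun d num => d.insert num (d.getD num 0 + 1)) := by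
  funext d num
  by_cases h : d.contains num = true
  · simp [h]
  · have h0 : d.getD num 0 = 0 := by
      have : d.get? num = none := by
        rcases hg : d.get? num with _ | v
        · rfl
        · exact absurd (by rw [PySem.Dict.contains_eq_isSome_get?, hg]; rfl) h
      simp [PySem.Dict.getD, this]
    simp [h, h0]

-- A's result is the distinct elements (first-occurrence order) with count ≤ 2.
theorem pvAEq (xs : List Int) :
    get_elements_with_no_more_than_two_occurrences xs
      = (PySem.List.dedup xs).filter (fun x => decide ((xs.count x : Int) ≤ 2)) := by
  unfold get_elements_with_no_more_than_two_occurrences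
  rw [pvStepEq, PySem.Dict.foldl_insert_getD_add_one_eq_counter]
  show List.foldl _ [] (PySem.Dict.counter xs).items = _
  rw [PySem.Dict.items_counter]
  rw [show (fun (result : List Int) (p : Int × Int) => if p.2 ≤ 2 then result ++ [p.1] else result)
        = (fun result p => if (fun (q : Int × Int) => decide (q.2 ≤ 2)) p then result ++ [(fun (q : Int × Int) => q.1) p] else result) by
      funext r p; by_cases h : p.2 ≤ 2 <;> simp [h]]
  rw [PySem.List.foldl_append_if]
  simp only [List.filter_map, List.map_map, PySem.List.dedup_eq_ofList,
    Function.comp_def, List.map_id_fun', id, List.nil_append]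

-- Membership in pvOverfull on a sorted (nondecreasing) list: exactly the values with count > 2.
theorem pvOverfull_mem_aux : ∀ (n : Nat) (s : List Int), s.length ≤ n → s.Pairwise (· ≤ ·) →
    ∀ (acc : PySem.Set Int) (v : Int), (v ∈ pvOverfull acc s ↔ v ∈ acc ∨ 2 < s.count v) := by
  intro n
  induction n with
  | zero =>
    intro s hlen _ acc v
    have : s = [] := List.eq_nil_of_length_eq_zero (Nat.le_zero.mp hlen)
    subst this; simp [pvOverfull]
  | succ n ih =>
    intro s hlen hs acc v
    cases s with
    | nil => simp [pvOverfull]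
    | cons x t =>
      have hrest : ∀ y ∈ t.dropWhile (fun y => y == x), x < y := by
        intro y hy
        have hyt : y ∈ t := List.Sublist.mem hy (List.dropWhile_sublist _)
        have hxy : x ≤ y := (List.pairwise_cons.mp hs).1 y hyt
        rcases hd : t.dropWhile (fun y => y == x) with _ | ⟨h0, rest'⟩
        · simp [hd] at hy
        · have hh0 : ¬ (h0 == x) = true := by
            have := List.head?_dropWhile_not (p := fun y => y == x) (l := t)
            rw [hd] at this; simpa using this
          have hx0 : x < h0 := lt_of_le_of_ne
            ((List.pairwise_cons.mp hs).1 h0 (List.Sublist.mem (by rw [hd]; simp) (List.dropWhile_sublist _)))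
            (by intro he; exact hh0 (by rw [← he]; simp))
          rw [hd] at hy
          rcases List.mem_cons.mp hy with rfl | hy'
          · exact hx0
          · have htp : t.Pairwise (· ≤ ·) := (List.pairwise_cons.mp hs).2
            have hdp : (t.dropWhile (fun y => y == x)).Pairwise (· ≤ ·) :=
              List.Pairwise.sublist (List.dropWhile_sublist _) htp
            rw [hd] at hdp
            exact lt_of_lt_of_le hx0 ((List.pairwise_cons.mp hdp).1 y hy')
      have hxnotrest : x ∉ t.dropWhile (fun y => y == x) := fun h => lt_irrefl x (hrest x h)
      have hcnt_split : (x :: t).count x = (t.takeWhile (fun y => y == x)).length + 1 := by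
        have hsplit := List.takeWhile_append_dropWhile (p := fun y => y == x) (l := t)
        calc (x :: t).count x = t.count x + 1 := by rw [List.count_cons_self]
          _ = ((t.takeWhile (fun y => y == x)) ++ (t.dropWhile (fun y => y == x))).count x + 1 := by rw [hsplit]
          _ = (t.takeWhile (fun y => y == x)).length + 1 := by
                rw [List.count_append, List.count_eq_zero.mpr hxnotrest, Nat.add_zero,
                  List.count_eq_length.mpr]
                intro y hy
                have h := List.mem_takeWhile_imp hy
                simp at h
                exact h.symm
      have hcnt_ne : ∀ w, w ≠ x → (x :: t).count w = (t.dropWhile (fun y => y == x)).count w := by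
        intro w hw
        have htake : (t.takeWhile (fun y => y == x)).count w = 0 := by
          rw [List.count_eq_zero]
          intro hwmem
          have h := List.mem_takeWhile_imp hwmem
          simp at h
          exact hw h
        have hsum : t.count w
            = (t.takeWhile (fun y => y == x)).count w + (t.dropWhile (fun y => y == x)).count w := by
          conv_lhs => rw [← List.takeWhile_append_dropWhile (p := fun y => y == x) (l := t)]
          rw [List.count_append]
        have hxw : ¬ ((x == w) = true) := fun h => hw (Eq.symm (show x = w by simpa using h))
        rw [List.count_cons, if_neg hxw, Nat.add_zero, hsum, htake, Nat.zero_add]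
      have htp : (t.dropWhile (fun y => y == x)).Pairwise (· ≤ ·) :=
        List.Pairwise.sublist (List.dropWhile_sublist _) (List.pairwise_cons.mp hs).2
      have hlen' : (t.dropWhile (fun y => y == x)).length ≤ n := by
        have h1 := List.length_dropWhile_le (p := fun y => y == x) (l := t)
        have h2 : t.length ≤ n := by simpa using Nat.le_of_succ_le_succ hlen
        omega
      rw [pvOverfull, ih _ hlen' htp]
      by_cases hvx : v = x
      · subst hvx
        by_cases hbig : 2 < (t.takeWhile (fun y => y == v)).length + 1
        · simp [hbig, PySem.Set.mem_add, hcnt_split, List.count_eq_zero.mpr hxnotrest]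
        · rw [if_neg hbig, hcnt_split, List.count_eq_zero.mpr hxnotrest]
          constructor
          · rintro (h | h)
            · exact Or.inl h
            · omega
          · rintro (h | h)
            · exact Or.inl h
            · omega
      · have hc := hcnt_ne v hvx
        by_cases hbig : 2 < (t.takeWhile (fun y => y == x)).length + 1
        · simp [hbig, PySem.Set.mem_add, hvx, hc]
        · simp [hbig, hc]

theorem pvOverfull_mem (s : List Int) (hs : s.Pairwise (· ≤ ·)) (acc : PySem.Set Int) (v : Int) :
    v ∈ pvOverfull acc s ↔ v ∈ acc ∨ 2 < s.count v :=
  pvOverfull_mem_aux s.length s (Nat.le_refl _) hs acc v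

-- The seen/result loop of B, phrased as a recursive dedup relative to an already-seen set.
def pvDedupFrom (seen : PySem.Set Int) : List Int → List Int
  | [] => []
  | x :: t =>
    if PySem.Set.contains seen x then pvDedupFrom seen t
    else x :: pvDedupFrom (PySem.Set.add seen x) t

theorem pvFoldEq (ov : PySem.Set Int) (xs : List Int) :
    ∀ (seen : PySem.Set Int) (res : List Int),
    (xs.foldl (fun (p : PySem.Set Int × List Int) x =>
        if PySem.Set.contains p.1 x then p
        else (PySem.Set.add p.1 x,
              if PySem.Set.contains ov x then p.2 else p.2 ++ [x])) (seen, res)).2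
      = res ++ (pvDedupFrom seen xs).filter (fun x => !PySem.Set.contains ov x) := by
  induction xs with
  | nil => intro seen res; simp [pvDedupFrom]
  | cons x t ih =>
    intro seen res
    by_cases hx : x ∈ seen
    · simpa [List.foldl_cons, pvDedupFrom, hx] using ih seen res
    · by_cases hov : x ∈ ov
      · simpa [List.foldl_cons, pvDedupFrom, PySem.Set.add, hx, hov]
          using ih (PySem.Set.add seen x) res
      · simpa [List.foldl_cons, pvDedupFrom, PySem.Set.add, hx, hov]
          using ih (PySem.Set.add seen x) (res ++ [x])

theorem pvDedupFromEq (xs : List Int) : ∀ (seen : PySem.Set Int),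
    seen ++ pvDedupFrom seen xs = List.foldl PySem.Set.add seen xs := by
  induction xs with
  | nil => intro seen; simp [pvDedupFrom]
  | cons x t ih =>
    intro seen
    by_cases hx : x ∈ seen
    · have hadd : PySem.Set.add seen x = seen := by simp [PySem.Set.add, hx]
      simp [pvDedupFrom, List.foldl_cons, hx, ih seen]
    · have hadd : PySem.Set.add seen x = seen ++ [x] := by simp [PySem.Set.add, hx]
      have h := ih (seen ++ [x])
      simp [pvDedupFrom, List.foldl_cons, hx, ← h]

theorem pvBEq (xs : List Int) :
    get_elements_with_no_more_than_two_occurrences_alt xs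
      = (PySem.List.dedup xs).filter
          (fun x => !PySem.Set.contains (pvOverfull PySem.Set.empty
            (PySem.List.sorted xs (fun x => x) false)) x) := by
  unfold get_elements_with_no_more_than_two_occurrences_alt
  rw [pvFoldEq]
  have : pvDedupFrom PySem.Set.empty xs = PySem.List.dedup xs := by
    have h := pvDedupFromEq xs PySem.Set.empty
    simp only [PySem.Set.empty, List.nil_append] at h
    rw [PySem.List.dedup_eq_ofList, PySem.Set.ofList_eq_foldl]
    exact h
  rw [this, List.nil_append]

-- ===== VERDICT (by name: the statement is the Claim_ definition above) =====
theorem get_elements_with_no_more_than_two_occurrences_spec : Claim_equal_get_elements_with_no_more_than_two_occurrences := by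
  intro xs _
  unfold Spec_get_elements_with_no_more_than_two_occurrences
  rw [pvAEq, pvBEq]
  apply List.filter_congr
  intro v hv
  have hvxs : v ∈ xs := (PySem.List.mem_dedup xs v).mp hv
  have hsorted : (PySem.List.sorted xs (fun x => x) false).Pairwise (· ≤ ·) :=
    PySem.List.sorted_pairwise xs (fun x => x)
  have hcount : (PySem.List.sorted xs (fun x => x) false).count v = xs.count v :=
    (PySem.List.sorted_perm xs (fun x => x) false).count_eq v
  have hmem := pvOverfull_mem _ hsorted PySem.Set.empty v
  rw [hcount] at hmem
  have hempty : (v ∈ (PySem.Set.empty : PySem.Set Int)) ↔ False := by simp [PySem.Set.empty]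
  rw [hempty, false_or] at hmem
  by_cases hle : (xs.count v : Int) ≤ 2
  · have : ¬ 2 < xs.count v := by omega
    have : v ∉ pvOverfull PySem.Set.empty (PySem.List.sorted xs (fun x => x) false) := by
      rw [hmem]; omega
    simp [hle]
    exact (by simpa [PySem.Set.empty] using this)
  · have : 2 < xs.count v := by omega
    have : v ∈ pvOverfull PySem.Set.empty (PySem.List.sorted xs (fun x => x) false) := hmem.mpr this
    simp [hle]
    exact (by simpa [PySem.Set.empty] using this)
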